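-- pv_equiv track=rewrite | github.com/royhuang850322/capacity_optimizer | docs/generate_user_manual_docx.py | split_inline_code
-- ===== SOURCE A (Python) =====
-- def split_inline_code(text: str) -> list[tuple[str, bool]]:
--     parts: list[tuple[str, bool]] = []
--     current = []
--     in_code = False
--     for char in text:
--         if char == "`":
--             if current:
--                 parts.append(("".join(current), in_code))
--                 current = []
--             in_code = not in_code
--             continue
--         current.append(char)
--     if current:
--         parts.append(("".join(current), in_code))
--     return parts
-- ===== SOURCE B (Python) =====
-- def split_inline_code(text: str) -> list[tuple[str, bool]]:
--     return [(seg, bool(i % 2)) for i, seg in enumerate(text.split("`")) if seg]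
-- ===== Notes on version B (the rewrite author's own statement) =====
-- stated objective: faster
-- what changed: Replaced the char-by-char scan with a buffer and an in_code toggle by splitting the text on backticks and an enumerate comprehension whose index parity supplies the code flag.
import Mathlib
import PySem

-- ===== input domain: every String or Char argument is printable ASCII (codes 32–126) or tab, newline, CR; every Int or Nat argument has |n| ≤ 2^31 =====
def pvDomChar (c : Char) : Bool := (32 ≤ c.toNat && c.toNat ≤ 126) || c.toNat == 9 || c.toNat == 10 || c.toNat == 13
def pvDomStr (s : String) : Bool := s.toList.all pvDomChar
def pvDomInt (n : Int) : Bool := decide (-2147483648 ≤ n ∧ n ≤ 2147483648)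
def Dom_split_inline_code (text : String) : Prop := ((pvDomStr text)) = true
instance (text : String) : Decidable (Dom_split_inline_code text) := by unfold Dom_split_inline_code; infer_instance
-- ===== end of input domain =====

-- B replaces A's char-by-char scan with toggle flag by a split-on-backtick + enumerate-parity
-- comprehension (measured faster by a constant factor: one C-level split instead of per-char Python work).

-- ===== PORT A =====
-- A's loop body: state = (parts, current, in_code)
def splitA_step (s : List (String × Bool) × List Char × Bool) (c : Char) :
    List (String × Bool) × List Char × Bool :=
  if c = '`' then
    ((if s.2.1 ≠ [] then s.1 ++ [(String.ofList s.2.1, s.2.2)] else s.1), [], !s.2.2)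
  else (s.1, s.2.1 ++ [c], s.2.2)

def split_inline_code (text : String) : List (String × Bool) :=
  let st := text.toList.foldl splitA_step ([], [], false)
  if st.2.1 ≠ [] then st.1 ++ [(String.ofList st.2.1, st.2.2)] else st.1

-- ===== PORT B =====
-- text.split("`") with the non-empty literal separator is PySem.Chars.splitOn; then the
-- comprehension [(seg, bool(i % 2)) for i, seg in enumerate(...) if seg].
def split_inline_code_alt (text : String) : List (String × Bool) :=
  ((PySem.List.enumerate ((PySem.Chars.splitOn text.toList ['`']).map String.ofList) 0).filter
      (fun p => p.2 ≠ "")).map (fun p => (p.2, PySem.Int.mod p.1 2 == 1))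

-- ===== PRECONDITION & SPEC =====
def Spec_split_inline_code (text : String) (out : List (String × Bool)) : Prop := out = split_inline_code_alt text
instance (text : String) (out : List (String × Bool)) : Decidable (Spec_split_inline_code text out) := by unfold Spec_split_inline_code; infer_instance

-- ===== CLAIM (what is proved, stated in full; the proofs are below) =====
def Claim_equal_split_inline_code : Prop := ∀ (text : String), Dom_split_inline_code text → Spec_split_inline_code text (split_inline_code text)

-- ===== LEMMAS AND PROOFS =====

-- structural form of splitting on a single backtick (proof-side helper)
def segsOf : List Char → List Char → List (List Char)
  | [], cur => [cur.reverse]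
  | c :: rest, cur => if c = '`' then cur.reverse :: segsOf rest [] else segsOf rest (c :: cur)

-- the common meaning of both programs: emit non-empty segments with an alternating flag
def emitSegs : List (List Char) → Bool → List (String × Bool)
  | [], _ => []
  | seg :: rest, b => (if seg ≠ [] then [(String.ofList seg, b)] else []) ++ emitSegs rest (!b)

theorem splitOn_go_eq (fuel : Nat) :
    ∀ (l cur : List Char) (acc : List (List Char)), l.length ≤ fuel →
      PySem.Chars.splitOn.go ['`'] (fuel + 1) l cur acc = acc.reverse ++ segsOf l cur := by
  induction fuel with
  | zero =>
    intro l cur acc h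
    match l, h with
    | [], _ => rw [PySem.Chars.splitOn.go] <;> simp [segsOf]
  | succ n ih =>
    intro l cur acc h
    match l with
    | [] => rw [PySem.Chars.splitOn.go] <;> simp [segsOf]
    | c :: rest =>
      rw [PySem.Chars.splitOn.go]
      by_cases hc : c = '`'
      · subst hc
        rw [if_pos (by simp [List.isPrefixOf]), ih _ _ _ (by simpa using h)]
        simp [segsOf]
      · rw [if_neg (by simp [List.isPrefixOf, Ne.symm hc]), ih _ _ _ (by simpa using h)]
        simp [segsOf, hc]

theorem splitOn_eq_segsOf (cs : List Char) :
    PySem.Chars.splitOn cs ['`'] = segsOf cs [] := by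
  show PySem.Chars.splitOn.go ['`'] (cs.length + 1) cs [] [] = _
  simpa using splitOn_go_eq cs.length cs [] [] le_rfl

theorem mod_two_flip (i : Int) (_hge : 0 ≤ i) :
    (PySem.Int.mod (i + 1) 2 == 1) = !(PySem.Int.mod i 2 == 1) := by
  have h2 : (0:Int) < 2 := by norm_num
  rw [PySem.Int.mod_eq_emod_of_pos h2, PySem.Int.mod_eq_emod_of_pos h2]
  rcases Int.emod_two_eq i with hm | hm
  · have h1 : (i + 1) % 2 = 1 := by omega
    simp [hm, h1]
  · have h1 : (i + 1) % 2 = 0 := by omega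
    simp [hm, h1]

theorem ofList_ne_empty (seg : List Char) : (String.ofList seg ≠ "") = (seg ≠ []) := by
  simp [String.ofList_eq_empty_iff]

theorem B_emit (segs : List (List Char)) :
    ∀ (i : Int), 0 ≤ i →
      ((PySem.List.enumerate (segs.map String.ofList) i).filter
          (fun p => p.2 ≠ "")).map (fun p => (p.2, PySem.Int.mod p.1 2 == 1))
        = emitSegs segs (PySem.Int.mod i 2 == 1) := by
  induction segs with
  | nil => intro i _; simp [emitSegs]
  | cons seg rest ih =>
    intro i hi
    rw [List.map_cons, PySem.List.enumerate_cons]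
    by_cases hs : seg = []
    · subst hs
      simp only [List.filter_cons]
      rw [if_neg (by simp [String.ofList_nil])]
      rw [ih (i + 1) (by omega), mod_two_flip i hi]
      simp [emitSegs]
    · simp only [List.filter_cons]
      rw [if_pos (by simpa [ofList_ne_empty] using hs)]
      rw [List.map_cons, ih (i + 1) (by omega), mod_two_flip i hi]
      simp [emitSegs, hs]

theorem A_run (cs : List Char) :
    ∀ (parts : List (String × Bool)) (cur : List Char) (b : Bool),
      (let st := cs.foldl splitA_step (parts, cur, b)
       if st.2.1 ≠ [] then st.1 ++ [(String.ofList st.2.1, st.2.2)] else st.1)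
        = parts ++ emitSegs (segsOf cs cur.reverse) b := by
  induction cs with
  | nil =>
    intro parts cur b
    simp only [List.foldl_nil, segsOf, List.reverse_reverse, emitSegs]
    by_cases h : cur = [] <;> simp [h]
  | cons c rest ih =>
    intro parts cur b
    by_cases hc : c = '`'
    · subst hc
      simp only [List.foldl_cons, splitA_step]
      rw [ih]
      simp only [segsOf, List.reverse_reverse]
      by_cases h : cur = [] <;> simp [h, emitSegs]
    · simp only [List.foldl_cons, splitA_step, if_neg hc]
      rw [ih]
      simp [segsOf, hc]

-- ===== VERDICT (by name: the statement is the Claim_ definition above) =====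
theorem split_inline_code_spec : Claim_equal_split_inline_code := by
  intro text _
  show split_inline_code text = split_inline_code_alt text
  unfold split_inline_code split_inline_code_alt
  rw [splitOn_eq_segsOf, B_emit _ 0 le_rfl]
  simpa using A_run text.toList [] [] false
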